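-- pv_equiv track=rewrite | github.com/cloudberries27/PYAYTHON | CS 2nd semester/HW 1/ccr330_hw1_q3.py | sum_of_odd_squares
-- ===== SOURCE A (Python) =====
-- def sum_of_odd_squares(num):
--     count = 0;
--     while num>0:
--         if (num % 2 != 0):
--             count += (num*num);
--             num-=1;
--         else:
--             num-=1;
--     return count;
-- ===== SOURCE B (Python) =====
-- def sum_of_odd_squares(num):
--     k = (num + 1) // 2
--     if k <= 0:
--         return 0
--     return k * (2 * k - 1) * (2 * k + 1) // 3
-- ===== Notes on version B (the rewrite author's own statement) =====
-- stated objective: faster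
-- what changed: Replaced the decrement-by-one loop with the closed-form sum of odd squares k(2k-1)(2k+1)/3, k = (num+1)//2.
import Mathlib
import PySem

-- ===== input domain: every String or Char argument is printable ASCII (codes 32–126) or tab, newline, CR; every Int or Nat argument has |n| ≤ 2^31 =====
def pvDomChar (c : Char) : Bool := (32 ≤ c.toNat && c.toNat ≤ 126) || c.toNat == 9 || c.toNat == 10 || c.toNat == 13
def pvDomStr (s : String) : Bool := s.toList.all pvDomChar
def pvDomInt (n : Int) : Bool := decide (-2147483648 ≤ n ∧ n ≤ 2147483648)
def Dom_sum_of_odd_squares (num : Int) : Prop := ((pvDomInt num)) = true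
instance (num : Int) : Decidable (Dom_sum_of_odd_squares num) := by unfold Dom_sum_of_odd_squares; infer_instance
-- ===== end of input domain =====

-- B replaces A's O(num) decrement loop by the closed-form k(2k-1)(2k+1)//3; proved equal on all ints.
-- ===== PORT A =====
-- literal transliteration of A's while loop: both branches decrement num by 1
def soosLoop (num count : Int) : Int :=
  if _h : num > 0 then
    if PySem.Int.mod num 2 ≠ 0 then soosLoop (num - 1) (count + num * num)
    else soosLoop (num - 1) count
  else count
termination_by num.toNat
decreasing_by all_goals omega

def sum_of_odd_squares (num : Int) : Int := soosLoop num 0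

-- ===== PORT B =====
def sum_of_odd_squares_alt (num : Int) : Int :=
  let k := PySem.Int.floordiv (num + 1) 2
  if k ≤ 0 then 0
  else PySem.Int.floordiv (k * (2 * k - 1) * (2 * k + 1)) 3

-- ===== PRECONDITION & SPEC =====
def Spec_sum_of_odd_squares (num : Int) (out : Int) : Prop := out = sum_of_odd_squares_alt num
instance (num : Int) (out : Int) : Decidable (Spec_sum_of_odd_squares num out) := by unfold Spec_sum_of_odd_squares; infer_instance

-- ===== CLAIM (what is proved, stated in full; the proofs are below) =====
def Claim_equal_sum_of_odd_squares : Prop := ∀ (num : Int), Dom_sum_of_odd_squares num → Spec_sum_of_odd_squares num (sum_of_odd_squares num)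

-- ===== LEMMAS AND PROOFS =====

-- 3 divides k*(2k-1)*(2k+1) = 4k^3 - k
lemma three_dvd_prod (k : Int) : (3 : Int) ∣ k * (2 * k - 1) * (2 * k + 1) := by
  have h : ((k : ZMod 3) * (2 * k - 1) * (2 * k + 1)) = 0 := by
    have : ∀ x : ZMod 3, x * (2 * x - 1) * (2 * x + 1) = 0 := by decide
    exact this _
  have := (ZMod.intCast_zmod_eq_zero_iff_dvd (k * (2 * k - 1) * (2 * k + 1)) 3).mp (by push_cast; exact h)
  exact this

-- closed form evaluated without the floordiv: alt num = m where 3*m = 4k^3 - k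
lemma alt_char (num : Int) :
    3 * sum_of_odd_squares_alt num =
      (if (num + 1) / 2 ≤ 0 then 0
       else ((num + 1) / 2) * (2 * ((num + 1) / 2) - 1) * (2 * ((num + 1) / 2) + 1)) := by
  unfold sum_of_odd_squares_alt
  rw [PySem.Int.floordiv_eq_ediv_of_pos (by norm_num : (0:Int) < 2)]
  set k := (num + 1) / 2 with hk
  by_cases h : k ≤ 0
  · simp [h]
  · simp only [h]
    rw [PySem.Int.floordiv_eq_ediv_of_pos (by norm_num : (0:Int) < 3)]
    exact Int.mul_ediv_cancel' (three_dvd_prod k)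

lemma alt_nonpos (num : Int) (h : num ≤ 0) : sum_of_odd_squares_alt num = 0 := by
  unfold sum_of_odd_squares_alt
  rw [PySem.Int.floordiv_eq_ediv_of_pos (by norm_num : (0:Int) < 2)]
  have : (num + 1) / 2 ≤ 0 := by omega
  simp [this]

lemma alt_rec (num : Int) (h : 0 < num) :
    sum_of_odd_squares_alt num =
      (if num % 2 ≠ 0 then num * num else 0) + sum_of_odd_squares_alt (num - 1) := by
  have h1 := alt_char num
  have h2 := alt_char (num - 1)
  by_cases hp : num % 2 = 0
  · -- even: k(num) = k(num-1), both closed forms coincide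
    have hk : (num - 1 + 1) / 2 = (num + 1) / 2 := by omega
    rw [hk] at h2
    have h3 := h1.trans h2.symm
    simp only [hp, ne_eq, not_true_eq_false, if_false, zero_add]
    omega
  · -- odd: num = 2k-1 with k = (num+1)/2, and k(num-1) = k-1
    set k := (num + 1) / 2 with hkdef
    have hk1 : num = 2 * k - 1 := by omega
    have hk2 : (num - 1 + 1) / 2 = k - 1 := by omega
    rw [hk2] at h2
    rw [if_neg (by omega : ¬ k ≤ 0)] at h1
    simp only [hp, ne_eq, not_false_eq_true, if_true]
    have h4 : num * num = (2 * k - 1) * (2 * k - 1) := by rw [hk1]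
    by_cases hk0 : k - 1 ≤ 0
    · have hknum : k = 1 := by omega
      rw [if_pos hk0] at h2
      rw [hknum] at h1 h4
      norm_num at h1 h4
      linarith [h1, h2, h4]
    · rw [if_neg hk0] at h2
      have hid : k * (2 * k - 1) * (2 * k + 1) =
          (k - 1) * (2 * (k - 1) - 1) * (2 * (k - 1) + 1) + 3 * ((2 * k - 1) * (2 * k - 1)) := by
        ring
      rw [hid] at h1
      linarith [h1, h2, h4]

lemma loop_eq (n : Nat) : ∀ (num count : Int), num.toNat = n →
    soosLoop num count = count + sum_of_odd_squares_alt num := by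
  induction n with
  | zero =>
    intro num count hn
    have h : ¬ num > 0 := by omega
    rw [soosLoop, dif_neg h, alt_nonpos num (by omega)]
    ring
  | succ m ih =>
    intro num count hn
    have h : num > 0 := by omega
    rw [soosLoop, dif_pos h]
    have hmod : PySem.Int.mod num 2 = num % 2 :=
      PySem.Int.mod_eq_emod_of_pos (by norm_num)
    have hrec := alt_rec num h
    have hm : (num - 1).toNat = m := by omega
    by_cases hp : num % 2 = 0
    · rw [if_neg (by rw [hmod, hp]; simp)]
      rw [ih (num - 1) count hm]
      rw [hrec]; simp [hp]
    · rw [if_pos (by rw [hmod]; exact hp)]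
      rw [ih (num - 1) (count + num * num) hm]
      rw [hrec]
      simp only [hp, ne_eq, not_false_eq_true, if_true]
      ring

-- ===== VERDICT (by name: the statement is the Claim_ definition above) =====
theorem sum_of_odd_squares_spec : Claim_equal_sum_of_odd_squares := by
  intro num _
  unfold Spec_sum_of_odd_squares sum_of_odd_squares
  rw [loop_eq num.toNat num 0 rfl]
  ring
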